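-- pv_equiv track=rewrite | github.com/TheTimelessPuppeteer/chi-saho-wei-2026-python | weeks/week-07/solutions/1114405013/solution_question_10062.py | reconstruct_order
-- ===== SOURCE A (Python) =====
-- class FenwickTree:
--     """支援前綴和與第 k 小可用編號查詢。"""
--
--     def __init__(self, size: int) -> None:
--         self.size = size
--         self.tree = [0] * (size + 1)
--
--     def add(self, index: int, delta: int) -> None:
--         while index <= self.size:
--             self.tree[index] += delta
--             index += index & -index
--
--     def prefix_sum(self, index: int) -> int:
--         total = 0
--         while index > 0:
--             total += self.tree[index]
--             index -= index & -index
--         return total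
--
--     def find_kth(self, kth: int) -> int:
--         """找出目前第 kth 小的可用編號。"""
--         index = 0
--         bit = 1
--         while bit << 1 <= self.size:
--             bit <<= 1
--
--         while bit > 0:
--             next_index = index + bit
--             if next_index <= self.size and self.tree[next_index] < kth:
--                 kth -= self.tree[next_index]
--                 index = next_index
--             bit >>= 1
--
--         return index + 1
--
-- def reconstruct_order(smaller_counts: list[int]) -> list[int]:
--     """由每個位置前方較小編號的數量重建排列。"""
--     size = len(smaller_counts) + 1
--     counts = [0] + smaller_counts
--     answer = [0] * size
--
--     fenwick = FenwickTree(size)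
--     for number in range(1, size + 1):
--         fenwick.add(number, 1)
--
--     for index in range(size - 1, -1, -1):
--         kth = counts[index] + 1
--         answer[index] = fenwick.find_kth(kth)
--         fenwick.add(answer[index], -1)
--
--     return answer
-- ===== SOURCE B (Python) =====
-- def prefix_sum(remaining, i):
--     total = 0
--     for x in range(1, i + 1):
--         total += remaining[x]
--     return total
--
-- def reconstruct_order(smaller_counts):
--     size = len(smaller_counts) + 1
--     counts = [0] + smaller_counts
--     remaining = [0] + [1] * size
--     top = 1 << (size.bit_length() - 1)
--     answer = [0] * size
--     for index in range(size - 1, -1, -1):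
--         kth = counts[index] + 1
--         pos = 0
--         b = top
--         while b:
--             if pos + b <= size and prefix_sum(remaining, pos + b) < kth:
--                 pos += b
--             b //= 2
--         answer[index] = pos + 1
--         if pos + 1 <= size:
--             remaining[pos + 1] -= 1
--     return answer
-- ===== Notes on version B (the rewrite author's own statement) =====
-- stated objective: alternative
-- what changed: Drops the Fenwick tree entirely: B keeps a flat list of per-number multiplicities, recomputes prefix sums by a plain scan at each probe of the bit descent, keeps kth fixed instead of shrinking it, and finds the top bit with int.bit_length() instead of a doubling loop.
import Mathlib
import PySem

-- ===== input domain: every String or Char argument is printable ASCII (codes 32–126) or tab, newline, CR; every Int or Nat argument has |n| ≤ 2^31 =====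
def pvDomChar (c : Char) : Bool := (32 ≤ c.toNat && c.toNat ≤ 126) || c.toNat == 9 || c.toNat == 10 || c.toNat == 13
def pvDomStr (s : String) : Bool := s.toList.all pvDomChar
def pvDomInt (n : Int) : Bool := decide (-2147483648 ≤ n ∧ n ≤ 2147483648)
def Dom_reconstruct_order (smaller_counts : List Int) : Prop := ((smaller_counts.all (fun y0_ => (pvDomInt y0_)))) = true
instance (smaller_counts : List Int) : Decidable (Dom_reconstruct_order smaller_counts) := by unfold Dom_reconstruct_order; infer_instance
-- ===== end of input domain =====

-- B drops the Fenwick tree: a flat multiplicity list with prefix sums recomputed by scanning,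
-- top bit via int.bit_length() (objective: alternative; not faster).

-- ===== PORT A =====
-- Python: index & -index
def pvLowb (x : Int) : Int := PySem.Int.band x (-x)

-- FenwickTree.add: while index <= size: tree[index] += delta; index += index & -index
-- (fuel only makes the loop total; tree[index] via toNat is exact for the in-range indices this program uses)
def pvFenAdd : Nat → Int → List Int → Int → Int → List Int
  | 0, _, tree, _, _ => tree
  | fuel+1, size, tree, index, delta =>
      if index ≤ size then
        pvFenAdd fuel size (tree.set index.toNat (tree.getD index.toNat 0 + delta)) (index + pvLowb index) delta
      else tree

-- find_kth: bit = 1; while bit << 1 <= size: bit <<= 1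
def pvBitUp : Nat → Int → Int → Int
  | 0, _, bit => bit
  | fuel+1, size, bit => if bit <<< (1:Nat) ≤ size then pvBitUp fuel size (bit <<< (1:Nat)) else bit

-- find_kth main descent: while bit > 0: …; return index + 1
def pvKthGo : Nat → Int → List Int → Int → Int → Int → Int
  | 0, _, _, _, index, _ => index + 1
  | fuel+1, size, tree, bit, index, kth =>
      if bit > 0 then
        let next := index + bit
        if next ≤ size ∧ tree.getD next.toNat 0 < kth then
          pvKthGo fuel size tree (bit >>> (1:Nat)) next (kth - tree.getD next.toNat 0)
        else
          pvKthGo fuel size tree (bit >>> (1:Nat)) index kth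
      else index + 1

def pvFindKth (size : Int) (tree : List Int) (kth : Int) : Int :=
  pvKthGo (size.toNat + 2) size tree (pvBitUp (size.toNat + 2) size 1) 0 kth

-- for index in range(size-1, -1, -1): kth = counts[index]+1; answer[index] = fenwick.find_kth(kth); fenwick.add(answer[index], -1)
def pvALoop (size : Int) (counts : List Int) : Nat → List Int → List Int → List Int
  | 0, _, acc => acc
  | n+1, tree, acc =>
      let kth := counts.getD n 0 + 1
      let a := pvFindKth size tree kth
      pvALoop size counts n (pvFenAdd (size.toNat + 2) size tree a (-1)) (a :: acc)

def reconstruct_order (smaller_counts : List Int) : List Int :=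
  let size : Int := (smaller_counts.length : Int) + 1
  let counts : List Int := 0 :: smaller_counts
  let tree0 : List Int := List.replicate (size.toNat + 1) 0
  let tree := (PySem.List.pyRange 1 (size + 1) 1).foldl (fun t number => pvFenAdd (size.toNat + 2) size t number 1) tree0
  pvALoop size counts size.toNat tree []

-- ===== PORT B =====
-- prefix_sum(remaining, i): total = 0; for x in range(1, i+1): total += remaining[x]; return total
def pvPrefixSum (remaining : List Int) (i : Int) : Int :=
  (PySem.List.pyRange 1 (i + 1) 1).foldl (fun total x => total + PySem.List.pyGetD remaining x 0) 0

-- while b: if pos + b <= size and prefix_sum(remaining, pos + b) < kth: pos += b; b //= 2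
def pvBDescend : Nat → Int → List Int → Int → Int → Int → Int
  | 0, _, _, _, pos, _ => pos
  | fuel+1, size, remaining, b, pos, kth =>
      if b ≠ 0 then
        if pos + b ≤ size ∧ pvPrefixSum remaining (pos + b) < kth then
          pvBDescend fuel size remaining (PySem.Int.floordiv b 2) (pos + b) kth
        else
          pvBDescend fuel size remaining (PySem.Int.floordiv b 2) pos kth
      else pos

-- for index in range(size-1, -1, -1): …; answer[index] = pos + 1; if pos+1 <= size: remaining[pos+1] -= 1
def pvBLoop (size : Int) (counts : List Int) (top : Int) : Nat → List Int → List Int → List Int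
  | 0, _, acc => acc
  | n+1, remaining, acc =>
      let kth := counts.getD n 0 + 1
      let pos := pvBDescend (size.toNat + 2) size remaining top 0 kth
      let remaining' := if pos + 1 ≤ size then
          remaining.set (pos + 1).toNat (remaining.getD (pos + 1).toNat 0 - 1)
        else remaining
      pvBLoop size counts top n remaining' ((pos + 1) :: acc)

def reconstruct_order_alt (smaller_counts : List Int) : List Int :=
  let size : Int := (smaller_counts.length : Int) + 1
  let counts : List Int := 0 :: smaller_counts
  let remaining : List Int := 0 :: List.replicate size.toNat 1
  let top : Int := (1 : Int) <<< (PySem.Int.bitLength size - 1)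
  pvBLoop size counts top size.toNat remaining []

-- ===== PRECONDITION & SPEC =====
def Spec_reconstruct_order (smaller_counts : List Int) (out : List Int) : Prop := out = reconstruct_order_alt smaller_counts
instance (smaller_counts : List Int) (out : List Int) : Decidable (Spec_reconstruct_order smaller_counts out) := by unfold Spec_reconstruct_order; infer_instance

-- ===== CLAIM (what is proved, stated in full; the proofs are below) =====
def Claim_equal_reconstruct_order : Prop := ∀ (smaller_counts : List Int), Dom_reconstruct_order smaller_counts → Spec_reconstruct_order smaller_counts (reconstruct_order smaller_counts)

-- ===== LEMMAS AND PROOFS =====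

-- ---- lowbit: pvLowb x = x & -x, over Nat: lowN n = n - (n &&& (n-1)) ----
def lowN (n : Nat) : Nat := n - (n &&& (n-1))

theorem land_halves (a b c d : Nat) (hc : c % 2 * (d % 2) = 0) (h2 : c/2 = a) (h3 : d/2 = b) :
    c &&& d = 2*(a &&& b) + (c%2) * (d%2) := by
  apply Nat.eq_of_testBit_eq; intro i
  cases i with
  | zero =>
      rw [Nat.testBit_land]; simp only [Nat.testBit_zero]
      rcases Nat.mod_two_eq_zero_or_one c with hc2 | hc2 <;> rcases Nat.mod_two_eq_zero_or_one d with hd2 | hd2 <;>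
        simp [hc2, hd2] <;> omega
  | succ j =>
      rw [Nat.testBit_land, Nat.testBit_succ, Nat.testBit_succ, Nat.testBit_succ, ← Nat.testBit_land, h2, h3]
      congr 1
      omega

theorem land_le_self (a b : Nat) : a &&& b ≤ a := by
  exact Nat.and_le_left

theorem lowN_rec (n : Nat) (h : 1 ≤ n) :
    lowN n = if n % 2 = 1 then 1 else 2 * lowN (n / 2) := by
  rcases Nat.mod_two_eq_zero_or_one n with hp | hp
  · -- even
    have hu : 1 ≤ n / 2 := by omega
    have hd1 : (n-1) % 2 = 1 := by omega
    have hdd : (n-1)/2 = n/2 - 1 := by omega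
    have hl : n &&& (n-1) = 2 * ((n/2) &&& ((n-1)/2)) + (n%2) * ((n-1)%2) :=
      land_halves _ _ _ _ (by rw [hp, hd1]) rfl rfl
    rw [hdd, hp, hd1] at hl
    have hle := land_le_self (n/2) (n/2 - 1)
    simp only [lowN, hl]
    rw [if_neg (by omega)]
    omega
  · -- odd
    have hd0 : (n-1) % 2 = 0 := by omega
    have hdd : (n-1)/2 = n/2 := by omega
    have hl : n &&& (n-1) = 2 * ((n/2) &&& ((n-1)/2)) + (n%2) * ((n-1)%2) :=
      land_halves _ _ _ _ (by rw [hp, hd0]) rfl rfl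
    rw [hdd, Nat.and_self, hp, hd0] at hl
    simp only [lowN, hl]
    rw [if_pos hp]
    omega

theorem lowN_pos (n : Nat) (h : 1 ≤ n) : 1 ≤ lowN n := by
  induction n using Nat.strong_induction_on with
  | _ n ih =>
    rw [lowN_rec n h]
    split
    · omega
    · have := ih (n/2) (by omega) (by omega)
      omega

theorem lowN_le (n : Nat) : lowN n ≤ n := by
  exact Nat.sub_le _ _

theorem lowN_grow (n : Nat) (h : 1 ≤ n) : 2 * lowN n ≤ lowN (n + lowN n) := by
  induction n using Nat.strong_induction_on with
  | _ n ih =>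
    rcases Nat.mod_two_eq_zero_or_one n with hp | hp
    · have hu : 1 ≤ n / 2 := by omega
      have h1 : lowN n = 2 * lowN (n/2) := by rw [lowN_rec n h]; rw [if_neg (by omega)]
      have h2 : lowN (n + lowN n) = 2 * lowN (n/2 + lowN (n/2)) := by
        rw [lowN_rec _ (by have := lowN_pos n h; omega)]
        rw [if_neg (by omega)]
        congr 2
        omega
      have := ih (n/2) (by omega) hu
      omega
    · have h1 : lowN n = 1 := by rw [lowN_rec n h]; rw [if_pos hp]
      have h2 : lowN (n + 1) = 2 * lowN ((n+1)/2) := by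
        rw [lowN_rec _ (by omega)]; rw [if_neg (by omega)]
      rw [h1]
      have := lowN_pos ((n+1)/2) (by omega)
      omega

theorem lowN_gap (i : Nat) : ∀ x : Nat, 1 ≤ x → x < i → i - lowN i < x → x + lowN x ≤ i := by
  induction i using Nat.strong_induction_on with
  | _ i ih =>
    intro x hx hxi hg
    have hi : 1 ≤ i := by omega
    rcases Nat.mod_two_eq_zero_or_one i with hp | hp
    · rcases Nat.mod_two_eq_zero_or_one x with hq | hq
      · have hli : lowN i = 2 * lowN (i/2) := by rw [lowN_rec i hi]; rw [if_neg (by omega)]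
        have hlx : lowN x = 2 * lowN (x/2) := by rw [lowN_rec x hx]; rw [if_neg (by omega)]
        have hle : lowN (i/2) ≤ i/2 := lowN_le _
        have := ih (i/2) (by omega) (x/2) (by omega) (by omega) (by omega)
        omega
      · have hlx : lowN x = 1 := by rw [lowN_rec x hx]; rw [if_pos hq]
        omega
    · have hli : lowN i = 1 := by rw [lowN_rec i hi]; rw [if_pos hp]
      omega

theorem lowN_pow (m : Nat) : ∀ a : Nat, lowN (2^m * (2*a+1)) = 2^m := by
  induction m with
  | zero =>
      intro a
      simp only [pow_zero, one_mul]
      rw [lowN_rec _ (by omega)]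
      rw [if_pos (by omega)]
  | succ m ih =>
      intro a
      have he : 2^(m+1) * (2*a+1) = 2 * (2^m * (2*a+1)) := by ring
      have hpos : 0 < 2^m * (2*a+1) := by positivity
      rw [he, lowN_rec _ (by omega)]
      rw [if_neg (by omega)]
      rw [Nat.mul_div_cancel_left _ (by norm_num), ih a]
      ring

theorem pvLowb_eq (x : Int) (h : 1 ≤ x) : pvLowb x = (lowN x.toNat : Int) := by
  have h1 : (0:Int) ≤ x := by omega
  have h2 : ¬ (0:Int) ≤ -x := by omega
  simp only [pvLowb, PySem.Int.band, if_pos h1, if_neg h2]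
  have h3 : (-(-x) - 1).toNat = x.toNat - 1 := by omega
  rw [h3, lowN]

theorem pvLowb_pos (x : Int) (h : 1 ≤ x) : 1 ≤ pvLowb x := by
  rw [pvLowb_eq x h]
  have := lowN_pos x.toNat (by omega)
  omega

theorem pvLowb_le (x : Int) (h : 1 ≤ x) : pvLowb x ≤ x := by
  rw [pvLowb_eq x h]
  have := lowN_le x.toNat
  omega

theorem pvLowb_grow (x : Int) (h : 1 ≤ x) : 2 * pvLowb x ≤ pvLowb (x + pvLowb x) := by
  have h1 := pvLowb_pos x h
  rw [pvLowb_eq x h] at *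
  have h2 : 1 ≤ x + (lowN x.toNat : Int) := by omega
  rw [pvLowb_eq _ h2]
  have h3 : (x + (lowN x.toNat : Int)).toNat = x.toNat + lowN x.toNat := by omega
  rw [h3]
  have := lowN_grow x.toNat (by omega)
  omega

theorem pvLowb_gap (i x : Int) (hx : 1 ≤ x) (hxi : x < i) (hg : i - pvLowb i < x) :
    x + pvLowb x ≤ i := by
  have hi : 1 ≤ i := by omega
  rw [pvLowb_eq i hi] at hg
  rw [pvLowb_eq x hx]
  have hle := lowN_le i.toNat
  have := lowN_gap i.toNat x.toNat (by omega) (by omega) (by omega)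
  omega

theorem pvLowb_pow (m : Nat) (index : Int) (hd : ((2:Int)^(m+1)) ∣ index) (h0 : 0 ≤ index) :
    pvLowb (index + 2^m) = 2^m := by
  obtain ⟨q, hq⟩ := hd
  have hq0 : 0 ≤ q := by
    by_contra hneg
    have : (2:Int)^(m+1) * q < 0 := by
      apply mul_neg_of_pos_of_neg (by positivity); omega
    omega
  have hval : index + 2^m = (2:Int)^m * (2*q+1) := by rw [hq]; ring
  have hpos : (1:Int) ≤ index + 2^m := by
    have : (0:Int) < 2^m := by positivity
    omega
  rw [pvLowb_eq _ hpos]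
  have htn : (index + (2:Int)^m).toNat = 2^m * (2*q.toNat+1) := by
    have hcast : ((2^m * (2*q.toNat+1) : Nat) : Int) = (2:Int)^m * (2*q+1) := by
      push_cast [Int.toNat_of_nonneg hq0]; ring
    rw [hval, ← hcast, Int.toNat_natCast]
  rw [htn, lowN_pow]
  push_cast
  ring

-- ---- the update chain of a Fenwick add ----
def reachF : Nat → Int → Int → Bool
  | 0, _, _ => false
  | f+1, x, i => (x == i) || (decide (x < i) && reachF f (x + pvLowb x) i)

def reachB (x i : Int) : Bool := reachF ((i - x).toNat + 1) x i

theorem reachF_le {f : Nat} : ∀ {x i : Int}, reachF f x i = true → x ≤ i := by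
  induction f with
  | zero => intro x i h; simp [reachF] at h
  | succ f ih =>
      intro x i h
      simp only [reachF, Bool.or_eq_true, beq_iff_eq, Bool.and_eq_true, decide_eq_true_eq] at h
      rcases h with h | ⟨h, _⟩
      · omega
      · omega

theorem reachB_le {x i : Int} (h : reachB x i = true) : x ≤ i := reachF_le h

theorem reachF_congr : ∀ (f g : Nat) (x i : Int), 1 ≤ x → (i - x).toNat < f → (i - x).toNat < g →
    reachF f x i = reachF g x i := by
  intro f
  induction f with
  | zero => intro g x i _ hf; omega
  | succ f ih =>
      intro g x i hx hf hg
      cases g with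
      | zero => omega
      | succ g =>
          simp only [reachF]
          by_cases hlt : x < i
          · have hp := pvLowb_pos x hx
            have hrec := ih g (x + pvLowb x) i (by omega) (by omega) (by omega)
            rw [hrec]
          · simp [hlt]

theorem reachB_false_of_lt {x i : Int} (h : i < x) : reachB x i = false := by
  cases hr : reachB x i
  · rfl
  · exact absurd (reachB_le hr) (by omega)

theorem reachB_step (x i : Int) (h : 1 ≤ x) :
    reachB x i = ((x == i) || (decide (x < i) && reachB (x + pvLowb x) i)) := by
  conv_lhs => rw [reachB, reachF]
  by_cases hlt : x < i
  · have hp := pvLowb_pos x h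
    congr 1
    congr 1
    rw [reachB]
    exact reachF_congr ((i - x).toNat) ((i - (x + pvLowb x)).toNat + 1) (x + pvLowb x) i (by omega) (by omega) (by omega)
  · simp [hlt]

theorem reach_inv (x : Int) : ∀ (f : Nat) (y i : Int), reachF f y i = true → 1 ≤ y →
    y - pvLowb y < x → x ≤ y → i - pvLowb i < x ∧ x ≤ i := by
  intro f
  induction f with
  | zero => intro y i h; simp [reachF] at h
  | succ f ih =>
      intro y i h hy hlow hxy
      simp only [reachF, Bool.or_eq_true, beq_iff_eq, Bool.and_eq_true, decide_eq_true_eq] at h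
      rcases h with h | ⟨hlt, h⟩
      · subst h; exact ⟨hlow, hxy⟩
      · have hp := pvLowb_pos y hy
        have hg := pvLowb_grow y hy
        exact ih (y + pvLowb y) i h (by omega) (by omega) (by omega)

theorem reachB_iff (x i : Int) (hx : 1 ≤ x) (hi : 1 ≤ i) :
    reachB x i = true ↔ (i - pvLowb i < x ∧ x ≤ i) := by
  constructor
  · intro h
    have hp := pvLowb_pos x hx
    exact reach_inv x ((i - x).toNat + 1) x i h hx (by omega) (by omega)
  · intro ⟨h1, h2⟩
    have hmeas : ∃ n : Nat, (i - x).toNat = n := ⟨_, rfl⟩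
    obtain ⟨n, hn⟩ := hmeas
    induction n using Nat.strong_induction_on generalizing x with
    | _ n ihn =>
        rw [reachB_step x i hx]
        by_cases heq : x = i
        · simp [heq]
        · have hlt : x < i := by omega
          have hp := pvLowb_pos x hx
          have hle := pvLowb_gap i x hx hlt h1
          have hrec := ihn ((i - (x + pvLowb x)).toNat) (by omega) (x + pvLowb x)
            (by omega) (by omega) (by omega) rfl
          simp [hlt, hrec]

-- ---- pointwise effect of pvFenAdd ----
theorem pvFenAdd_length (f : Nat) : ∀ (size : Int) (tree : List Int) (x δ : Int),
    (pvFenAdd f size tree x δ).length = tree.length := by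
  induction f with
  | zero => intro size tree x δ; rfl
  | succ f ih =>
      intro size tree x δ
      simp only [pvFenAdd]
      split
      · rw [ih]; simp
      · rfl

theorem pvFenAdd_getD : ∀ (f : Nat) (size : Int) (tree : List Int) (x δ : Int), 1 ≤ x →
    (size - x + 1).toNat ≤ f → tree.length = size.toNat + 1 →
    ∀ i : Int, 1 ≤ i → i ≤ size →
    (pvFenAdd f size tree x δ).getD i.toNat 0
      = tree.getD i.toNat 0 + (if reachB x i then δ else 0) := by
  intro f
  induction f with
  | zero =>
      intro size tree x δ hx hf hlen i hi1 hi2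
      have hfa : reachB x i = false := reachB_false_of_lt (by omega)
      simp only [pvFenAdd, hfa]
      simp
  | succ f ih =>
      intro size tree x δ hx hf hlen i hi1 hi2
      simp only [pvFenAdd]
      by_cases hxs : x ≤ size
      · rw [if_pos hxs]
        have hp := pvLowb_pos x hx
        have hx' : (1:Int) ≤ x + pvLowb x := by omega
        have hfuel : (size - (x + pvLowb x) + 1).toNat ≤ f := by omega
        have hlen' : (tree.set x.toNat (tree.getD x.toNat 0 + δ)).length = size.toNat + 1 := by
          rw [List.length_set]; exact hlen
        rw [ih size _ (x + pvLowb x) δ hx' hfuel hlen' i hi1 hi2]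
        by_cases heq : x = i
        · subst heq
          have hset : (tree.set x.toNat (tree.getD x.toNat 0 + δ)).getD x.toNat 0
              = tree.getD x.toNat 0 + δ := by
            rw [List.getD_eq_getElem?_getD, List.getElem?_set_self (by omega), Option.getD_some]
          rw [hset]
          have hr1 : reachB x x = true := by
            rw [reachB_step x x hx]; simp
          have hr2 : reachB (x + pvLowb x) x = false := reachB_false_of_lt (by omega)
          rw [hr1, hr2]
          simp
        · have hset : (tree.set x.toNat (tree.getD x.toNat 0 + δ)).getD i.toNat 0
              = tree.getD i.toNat 0 := by
            rw [List.getD_eq_getElem?_getD, List.getElem?_set_ne (by omega), ← List.getD_eq_getElem?_getD]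
          rw [hset]
          congr 1
          by_cases hlt : x < i
          · rw [reachB_step x i hx]
            simp [heq, hlt]
          · have hfa : reachB x i = false := reachB_false_of_lt (by omega)
            have hfb : reachB (x + pvLowb x) i = false := reachB_false_of_lt (by omega)
            rw [hfa, hfb]
      · rw [if_neg hxs]
        have hfa : reachB x i = false := reachB_false_of_lt (by omega)
        rw [hfa]
        simp

-- ---- tree invariant: the Fenwick tree stores differences of a prefix-sum function ----
def TreeInvP (S : Int) (P : Int → Int) (tree : List Int) : Prop :=
  tree.length = S.toNat + 1 ∧
  ∀ i : Int, 1 ≤ i → i ≤ S → tree.getD i.toNat 0 = P i - P (i - pvLowb i)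

theorem treeInvP_congr (S : Int) (P Q : Int → Int) (tree : List Int)
    (h : ∀ j : Int, 0 ≤ j → j ≤ S → P j = Q j) (inv : TreeInvP S P tree) :
    TreeInvP S Q tree := by
  refine ⟨inv.1, ?_⟩
  intro i hi1 hi2
  have hp := pvLowb_pos i hi1
  have hle := pvLowb_le i hi1
  rw [inv.2 i hi1 hi2, h i (by omega) hi2, h (i - pvLowb i) (by omega) (by omega)]

theorem treeInvP_upd (S : Int) (P : Int → Int) (tree : List Int) (inv : TreeInvP S P tree)
    (x δ : Int) (hx : 1 ≤ x) :
    TreeInvP S (fun i => P i + (if x ≤ i then δ else 0)) (pvFenAdd (S.toNat + 2) S tree x δ) := by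
  refine ⟨by rw [pvFenAdd_length]; exact inv.1, ?_⟩
  intro i hi1 hi2
  rw [pvFenAdd_getD (S.toNat + 2) S tree x δ hx (by omega) inv.1 i hi1 hi2, inv.2 i hi1 hi2]
  beta_reduce
  have hp := pvLowb_pos i hi1
  by_cases hr : reachB x i = true
  · have h2 := (reachB_iff x i hx hi1).1 hr
    rw [hr, if_pos rfl, if_pos h2.2, if_neg (by omega)]
    ring
  · rw [Bool.not_eq_true] at hr
    have hno : ¬ (i - pvLowb i < x ∧ x ≤ i) := fun hcc =>
      absurd ((reachB_iff x i hx hi1).2 hcc) (by rw [hr]; simp)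
    rw [hr, if_neg (by simp)]
    by_cases h1 : x ≤ i
    · rw [if_pos h1, if_pos (by omega)]
      ring
    · rw [if_neg h1, if_neg (by omega)]
      ring

theorem pvBitUp_spec (S : Int) (hS : 1 ≤ S) : ∀ (f j : Nat), ((2:Int)^j ≤ S) → (S - 2^j).toNat < f →
    ∃ M : Nat, pvBitUp f S (2^j) = 2^M ∧ (2:Int)^M ≤ S ∧ S < 2^(M+1) := by
  intro f
  induction f with
  | zero => intro j hj hf; omega
  | succ f ih =>
      intro j hj hf
      have hpos : (0:Int) < 2^j := by positivity
      have hsh : ((2:Int)^j <<< (1:Nat)) = 2^(j+1) := by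
        rw [Int.shiftLeft_eq]; ring
      simp only [pvBitUp, hsh]
      by_cases hle : (2:Int)^(j+1) ≤ S
      · rw [if_pos hle]
        have hpos2 : (0:Int) < 2^(j+1) := by positivity
        have h21 : (2:Int)^(j+1) = 2 * 2^j := by ring
        exact ih (j+1) hle (by omega)
      · rw [if_neg hle]
        exact ⟨j, rfl, hj, by omega⟩

theorem pvKthGo_zero (f : Nat) (S : Int) (tree : List Int) (idx kth : Int) :
    pvKthGo f S tree 0 idx kth = idx + 1 := by
  cases f <;> simp [pvKthGo]

theorem pow_succ_shiftR (m : Nat) : ((2:Int)^(m+1) >>> (1:Nat)) = 2^m := by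
  have h1 : ((2:Int)^(m+1)) = ((2^(m+1) : Nat) : Int) := by push_cast; rfl
  have h2 : (((2^(m+1) : Nat) : Int) >>> (1:Nat)) = ((2^(m+1) >>> 1 : Nat) : Int) := rfl
  have h3 : (2^(m+1) >>> 1 : Nat) = 2^m := by
    rw [Nat.shiftRight_succ, Nat.shiftRight_zero, Nat.pow_succ, Nat.mul_div_cancel _ (by norm_num)]
  rw [h1, h2, h3]
  push_cast
  rfl

-- ---- prefix sums ----
theorem pvPrefixSum_nonpos (rem : List Int) (i : Int) (h : i ≤ 0) : pvPrefixSum rem i = 0 := by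
  rw [pvPrefixSum, PySem.List.pyRange_one_eq_nil (by omega)]
  rfl

theorem pvPrefixSum_succ (rem : List Int) (i : Int) (h : 0 ≤ i) :
    pvPrefixSum rem (i + 1) = pvPrefixSum rem i + PySem.List.pyGetD rem (i + 1) 0 := by
  rw [pvPrefixSum, pvPrefixSum]
  rw [show i + 1 + 1 = (i + 1) + 1 from rfl]
  rw [PySem.List.pyRange_one_succ_right (by omega), List.foldl_append]
  rfl

theorem sum_shift (l : List Int) (f g : Int → Int) (x v : Int) (hnd : l.Nodup)
    (hfg : ∀ y ∈ l, y ≠ x → f y = g y) (hfx : x ∈ l → f x = g x + v) :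
    (l.map f).sum = (l.map g).sum + (if x ∈ l then v else 0) := by
  induction l with
  | nil => simp
  | cons a l ih =>
      simp only [List.map_cons, List.sum_cons]
      have hnd' := (List.nodup_cons.1 hnd).2
      have hfg' : ∀ y ∈ l, y ≠ x → f y = g y :=
        fun y hy hyx => hfg y (List.mem_cons_of_mem a hy) hyx
      by_cases hax : a = x
      · subst hax
        have hnx : a ∉ l := (List.nodup_cons.1 hnd).1
        rw [ih hnd' hfg' (fun hm => absurd hm hnx)]
        rw [hfx List.mem_cons_self, if_pos List.mem_cons_self, if_neg hnx]
        ring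
      · rw [ih hnd' hfg' (fun hm => hfx (List.mem_cons_of_mem a hm))]
        rw [hfg a List.mem_cons_self hax]
        by_cases hxl : x ∈ l
        · rw [if_pos hxl, if_pos (List.mem_cons_of_mem a hxl)]
          ring
        · rw [if_neg hxl, if_neg (by simp [Ne.symm hax, hxl])]
          ring

theorem pvPrefixSum_set (rem : List Int) (x δ : Int) (hx : 1 ≤ x) (hlt : x.toNat < rem.length) :
    ∀ j : Int, pvPrefixSum (rem.set x.toNat (rem.getD x.toNat 0 + δ)) j
      = pvPrefixSum rem j + (if x ≤ j then δ else 0) := by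
  intro j
  rw [pvPrefixSum, pvPrefixSum, PySem.List.foldl_add, PySem.List.foldl_add, zero_add, zero_add]
  have hmem : x ∈ PySem.List.pyRange 1 (j + 1) 1 ↔ x ≤ j := by
    rw [PySem.List.mem_pyRange_one]
    omega
  rw [sum_shift (PySem.List.pyRange 1 (j + 1) 1)
      (fun y => PySem.List.pyGetD (rem.set x.toNat (rem.getD x.toNat 0 + δ)) y 0)
      (fun y => PySem.List.pyGetD rem y 0) x δ (PySem.List.nodup_pyRange_one 1 (j+1)) ?_ ?_]
  · congr 1
    by_cases hxj : x ≤ j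
    · rw [if_pos (hmem.2 hxj), if_pos hxj]
    · rw [if_neg (fun hc => hxj (hmem.1 hc)), if_neg hxj]
  · intro y hy hyx
    have hy1 : 1 ≤ y := by
      have := PySem.List.mem_pyRange_one.1 hy
      omega
    beta_reduce
    rw [PySem.List.pyGetD_of_nonneg _ _ (by omega), PySem.List.pyGetD_of_nonneg _ _ (by omega)]
    rw [List.getD_eq_getElem?_getD, List.getD_eq_getElem?_getD,
      List.getElem?_set_ne (by omega)]
    rw [← List.getD_eq_getElem?_getD]
  · intro _
    beta_reduce
    rw [PySem.List.pyGetD_of_nonneg _ _ (by omega), PySem.List.pyGetD_of_nonneg _ _ (by omega)]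
    rw [List.getD_eq_getElem?_getD, List.getD_eq_getElem?_getD,
      List.getElem?_set_self hlt]
    simp

-- ---- the two descents take the same path ----
theorem pvBDescend_zero (f : Nat) (S : Int) (rem : List Int) (pos kth : Int) :
    pvBDescend f S rem 0 pos kth = pos := by
  cases f <;> simp [pvBDescend]

theorem pow_floordiv_two (m : Nat) : PySem.Int.floordiv ((2:Int)^(m+1)) 2 = 2^m := by
  rw [PySem.Int.floordiv_eq_ediv_of_pos (by norm_num)]
  rw [pow_succ, Int.mul_ediv_cancel _ (by norm_num)]

theorem descend_eq (S : Int) (tree rem : List Int) (k : Int)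
    (inv : TreeInvP S (pvPrefixSum rem) tree) :
    ∀ (m : Nat) (fuel : Nat) (index : Int), m < fuel → ((2:Int)^(m+1)) ∣ index → 0 ≤ index →
    index ≤ S →
    ∃ pos : Int,
      pvKthGo fuel S tree (2^m) index (k - pvPrefixSum rem index) = pos + 1 ∧
      pvBDescend fuel S rem (2^m) index k = pos ∧ 0 ≤ pos ∧ pos ≤ S := by
  intro m
  induction m with
  | zero =>
      intro fuel index hfuel hdvd h0 hiS
      obtain ⟨g, rfl⟩ : ∃ g, fuel = g + 1 := ⟨fuel - 1, by omega⟩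
      simp only [pvKthGo, pvBDescend, pow_zero]
      rw [if_pos (by norm_num : (1:Int) > 0), if_pos (by norm_num : (1:Int) ≠ 0)]
      have hshA : ((1:Int) >>> (1:Nat)) = 0 := by decide
      have hshB : PySem.Int.floordiv (1:Int) 2 = 0 := by decide
      by_cases hns : index + 1 ≤ S
      · have hlowb : pvLowb (index + 1) = 1 := by
          have := pvLowb_pow 0 index (by simpa using hdvd) h0
          simpa using this
        have hread : tree.getD (index + 1).toNat 0
            = pvPrefixSum rem (index + 1) - pvPrefixSum rem index := by
          rw [inv.2 (index + 1) (by omega) hns, hlowb]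
          norm_num
        by_cases hck : pvPrefixSum rem (index + 1) < k
        · rw [if_pos (by refine ⟨hns, ?_⟩; rw [hread]; omega),
            if_pos (by exact ⟨hns, hck⟩)]
          rw [hshA, hshB, pvKthGo_zero, pvBDescend_zero]
          exact ⟨index + 1, rfl, rfl, by omega, hns⟩
        · rw [if_neg (by rw [hread]; intro hcc; exact hck (by omega)),
            if_neg (by intro hcc; exact hck hcc.2)]
          rw [hshA, hshB, pvKthGo_zero, pvBDescend_zero]
          exact ⟨index, rfl, rfl, h0, hiS⟩
      · rw [if_neg (by intro hcc; exact hns hcc.1), if_neg (by intro hcc; exact hns hcc.1)]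
        rw [hshA, hshB, pvKthGo_zero, pvBDescend_zero]
        exact ⟨index, rfl, rfl, h0, hiS⟩
  | succ m ih =>
      intro fuel index hfuel hdvd h0 hiS
      obtain ⟨g, rfl⟩ : ∃ g, fuel = g + 1 := ⟨fuel - 1, by omega⟩
      have hbpos : (0:Int) < 2^(m+1) := by positivity
      simp only [pvKthGo, pvBDescend]
      rw [if_pos (by omega : (2:Int)^(m+1) > 0), if_pos (by omega : (2:Int)^(m+1) ≠ 0)]
      rw [pow_succ_shiftR m, pow_floordiv_two m]
      by_cases hns : index + 2^(m+1) ≤ S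
      · have hlowb : pvLowb (index + 2^(m+1)) = 2^(m+1) := pvLowb_pow (m+1) index hdvd h0
        have hread : tree.getD (index + 2^(m+1)).toNat 0
            = pvPrefixSum rem (index + 2^(m+1)) - pvPrefixSum rem index := by
          rw [inv.2 (index + 2^(m+1)) (by omega) hns, hlowb]
          norm_num
        by_cases hck : pvPrefixSum rem (index + 2^(m+1)) < k
        · rw [if_pos (by refine ⟨hns, ?_⟩; rw [hread]; omega),
            if_pos (by exact ⟨hns, hck⟩)]
          have harg : k - pvPrefixSum rem index - tree.getD (index + 2^(m+1)).toNat 0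
              = k - pvPrefixSum rem (index + 2^(m+1)) := by rw [hread]; ring
          rw [harg]
          obtain ⟨q, hq⟩ := hdvd
          exact ih g (index + 2^(m+1)) (by omega) ⟨2*q + 1, by rw [hq]; ring⟩ (by omega) hns
        · rw [if_neg (by rw [hread]; intro hcc; exact hck (by omega)),
            if_neg (by intro hcc; exact hck hcc.2)]
          exact ih g index (by omega) (dvd_trans (pow_dvd_pow 2 (by omega)) hdvd) h0 hiS
      · rw [if_neg (by intro hcc; exact hns hcc.1), if_neg (by intro hcc; exact hns hcc.1)]
        exact ih g index (by omega) (dvd_trans (pow_dvd_pow 2 (by omega)) hdvd) h0 hiS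

-- ---- A's fenwick.add is a no-op above size ----
theorem pvFenAdd_gt (f : Nat) (S : Int) (tree : List Int) (x δ : Int) (h : ¬ x ≤ S) :
    pvFenAdd f S tree x δ = tree := by
  cases f with
  | zero => rfl
  | succ f => simp only [pvFenAdd, if_neg h]

-- ---- the two top-bit computations agree ----
theorem pow_bounds_unique (S : Int) (M K : Nat)
    (h1 : (2:Int)^M ≤ S) (h2 : S < 2^(M+1)) (h3 : (2:Int)^K ≤ S) (h4 : S < 2^(K+1)) : M = K := by
  by_contra hne
  rcases Nat.lt_or_ge M K with h | h
  · have : (2:Int)^(M+1) ≤ 2^K := pow_le_pow_right₀ (by norm_num) (by omega)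
    omega
  · have hKM : K < M := by omega
    have : (2:Int)^(K+1) ≤ 2^M := pow_le_pow_right₀ (by norm_num) (by omega)
    omega

theorem bitLength_top (S : Int) (hS : 1 ≤ S) :
    ∃ K : Nat, (1 : Int) <<< (PySem.Int.bitLength S - 1) = 2^K ∧ (2:Int)^K ≤ S ∧ S < 2^(K+1) := by
  have hbl1 : 1 ≤ PySem.Int.bitLength S := by
    by_contra hc
    have h0 : PySem.Int.bitLength S = 0 := by omega
    have := PySem.Int.lt_two_pow_bitLength S
    rw [h0] at this
    simp at this
    omega
  refine ⟨PySem.Int.bitLength S - 1, ?_, ?_, ?_⟩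
  · rw [Int.shiftLeft_eq]
    ring
  · have h := PySem.Int.two_pow_bitLength_le S (by omega)
    have h2 : ((2:Int))^(PySem.Int.bitLength S - 1) ≤ (S.natAbs : Int) := by exact_mod_cast h
    have h3 : (S.natAbs : Int) = S := by omega
    rw [h3] at h2
    exact h2
  · have h := PySem.Int.lt_two_pow_bitLength S
    have h2 : (S.natAbs : Int) < (2:Int)^(PySem.Int.bitLength S) := by exact_mod_cast h
    have h3 : (S.natAbs : Int) = S := by omega
    have heq : PySem.Int.bitLength S - 1 + 1 = PySem.Int.bitLength S := by omega
    rw [heq, ← h3]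
    exact h2

-- ---- main loop ----
theorem main_eq (S : Int) (counts : List Int) (top : Int) (M : Nat)
    (htopA : pvBitUp (S.toNat + 2) S 1 = 2^M) (htopB : top = 2^M)
    (hMle : (2:Int)^M ≤ S) (hS : 1 ≤ S) :
    ∀ (n : Nat) (rem tree acc : List Int), TreeInvP S (pvPrefixSum rem) tree →
    rem.length = S.toNat + 1 →
    pvALoop S counts n tree acc = pvBLoop S counts top n rem acc := by
  have hMlt : (M:Int) < 2^M := by exact_mod_cast Nat.lt_two_pow_self (n := M)
  subst htopB
  intro n
  induction n with
  | zero => intro rem tree acc _ _; rfl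
  | succ n ih =>
      intro rem tree acc inv hlen
      obtain ⟨pos, hA, hB, hpos0, hposS⟩ := descend_eq S tree rem (counts.getD n 0 + 1) inv M
        (S.toNat + 2) 0 (by omega) (dvd_zero _) le_rfl (by omega)
      rw [pvPrefixSum_nonpos rem 0 le_rfl, sub_zero] at hA
      simp only [pvALoop, pvBLoop]
      rw [pvFindKth, htopA, hA, hB]
      by_cases hfit : pos + 1 ≤ S
      · rw [if_pos hfit]
        apply ih
        · have hupd := treeInvP_upd S (pvPrefixSum rem) tree inv (pos + 1) (-1) (by omega)
          apply treeInvP_congr S _ _ _ ?_ hupd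
          intro j _ _
          rw [show rem.getD (pos + 1).toNat 0 - 1 = rem.getD (pos + 1).toNat 0 + (-1) from by ring,
            pvPrefixSum_set rem (pos + 1) (-1) (by omega) (by omega) j]
        · rw [List.length_set]; exact hlen
      · rw [if_neg hfit]
        rw [pvFenAdd_gt _ _ _ _ _ hfit]
        exact ih rem tree _ inv hlen

-- ---- initial state ----
theorem prefix_init (S : Int) (hS : 1 ≤ S) : ∀ jn : Nat, (jn : Int) ≤ S →
    pvPrefixSum (0 :: List.replicate S.toNat 1) (jn : Int) = (jn : Int) := by
  intro jn
  induction jn with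
  | zero => intro _; exact pvPrefixSum_nonpos _ 0 le_rfl
  | succ jn ih =>
      intro hle
      have hjn : ((jn : Int)) ≤ S := by push_cast at hle ⊢; omega
      rw [show ((jn + 1 : Nat) : Int) = (jn : Int) + 1 from by push_cast; ring]
      rw [pvPrefixSum_succ _ _ (by positivity), ih hjn]
      have hget : PySem.List.pyGetD ((0 : Int) :: List.replicate S.toNat (1 : Int)) ((jn : Int) + 1) 0 = (1 : Int) := by
        rw [show ((jn : Int) + 1) = ((jn + 1 : Nat) : Int) from by push_cast; ring]
        rw [PySem.List.pyGetD_natCast]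
        rw [List.getD_eq_getElem?_getD, List.getElem?_cons_succ, List.getElem?_replicate]
        rw [if_pos (by push_cast at hle; omega)]
        rfl
      rw [hget]

theorem build_invariant (S : Int) (hS : 1 ≤ S) : ∀ m : Nat, (m : Int) ≤ S →
    TreeInvP S (fun i => min i (m : Int))
      ((PySem.List.pyRange 1 ((m:Int) + 1) 1).foldl
        (fun t number => pvFenAdd (S.toNat + 2) S t number 1)
        (List.replicate (S.toNat + 1) 0)) := by
  intro m
  induction m with
  | zero =>
      intro _
      rw [show PySem.List.pyRange 1 (((0:Nat):Int) + 1) 1 = [] from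
        PySem.List.pyRange_one_eq_nil (by norm_num)]
      refine ⟨by simp, ?_⟩
      intro i hi1 hi2
      have hp := pvLowb_pos i hi1
      have hle := pvLowb_le i hi1
      rw [List.foldl_nil, List.getD_eq_getElem?_getD, List.getElem?_replicate]
      beta_reduce
      have hm1 : min i ((0:Nat):Int) = 0 := by omega
      have hm2 : min (i - pvLowb i) ((0:Nat):Int) = 0 := by omega
      rw [hm1, hm2]
      split <;> rfl
  | succ m ih =>
      intro hle
      have hm : ((m:Nat) : Int) ≤ S := by push_cast at hle ⊢; omega
      have hsplit : PySem.List.pyRange 1 (((m+1 : Nat) : Int) + 1) 1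
          = PySem.List.pyRange 1 ((m:Int) + 1) 1 ++ [(m:Int) + 1] := by
        have := PySem.List.pyRange_one_succ_right (a := 1) (b := (m:Int) + 1) (by omega)
        rw [← this]
        congr 1
      rw [hsplit, List.foldl_append, List.foldl_cons, List.foldl_nil]
      have hupd := treeInvP_upd S _ _ (ih hm) ((m:Int) + 1) 1 (by omega)
      apply treeInvP_congr S _ _ _ ?_ hupd
      intro j _ _
      push_cast
      omega

-- ===== VERDICT (by name: the statement is the Claim_ definition above) =====
theorem reconstruct_order_spec : Claim_equal_reconstruct_order := by
  intro s _
  unfold Spec_reconstruct_order reconstruct_order reconstruct_order_alt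
  simp only []
  set S : Int := (s.length : Int) + 1 with hS
  have hS1 : (1:Int) ≤ S := by omega
  have hStc : ((S.toNat : Nat) : Int) = S := by omega
  obtain ⟨M, hb, hM1, hM2⟩ := pvBitUp_spec S hS1 (S.toNat + 2) 0 (by simpa using hS1) (by omega)
  have hb' : pvBitUp (S.toNat + 2) S 1 = 2^M := by simpa using hb
  obtain ⟨K, hK, hK1, hK2⟩ := bitLength_top S hS1
  have hMK : M = K := pow_bounds_unique S M K hM1 hM2 hK1 hK2
  have htopB : (1 : Int) <<< (PySem.Int.bitLength S - 1) = 2^M := by rw [hK, hMK]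
  have hinv := build_invariant S hS1 S.toNat (by omega)
  rw [hStc] at hinv
  have hinv' : TreeInvP S (pvPrefixSum (0 :: List.replicate S.toNat 1))
      ((PySem.List.pyRange 1 (S + 1) 1).foldl
        (fun t number => pvFenAdd (S.toNat + 2) S t number 1)
        (List.replicate (S.toNat + 1) 0)) := by
    apply treeInvP_congr S _ _ _ ?_ hinv
    intro j hj0 hjS
    have hjn : j = ((j.toNat : Nat) : Int) := by omega
    rw [hjn, prefix_init S hS1 j.toNat (by omega)]
    omega
  exact main_eq S (0 :: s) ((1 : Int) <<< (PySem.Int.bitLength S - 1)) M hb' htopB hM1 hS1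
    S.toNat (0 :: List.replicate S.toNat 1)
    _ [] hinv' (by simp)
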